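-- pv_equiv track=rewrite | github.com/DanielPeretz30/CompetitiveProgramming | CodeChef/AdvancedLevel/GameOnStrip/GameOnStrip.py | bestSecond
-- ===== SOURCE A (Python) =====
-- def bestSecond(A,n):
--     best = 0
--     second = 0
--     counter = 0
--     for i in range(n):
--         if A[i] == 0:
--             counter += 1
--         else:
--             if counter > best:
--                 second = best
--                 best = counter
--             elif counter == best:
--                 second = counter
--             elif counter > second:
--                 second = counter
--             counter = 0
--     return best,second
-- ===== SOURCE B (Python) =====
-- def bestSecond(A, n):
--     # First pass: collect the lengths of zero-runs, flushed at each non-zero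
--     # (the trailing run is never flushed, matching the task's counting rule).
--     runs = []
--     counter = 0
--     for x in A[:max(n, 0)]:
--         if x == 0:
--             counter += 1
--         else:
--             runs.append(counter)
--             counter = 0
--     # Second pass: the two largest run lengths, each defaulting to 0.
--     runs.sort(reverse=True)
--     best = runs[0] if len(runs) > 0 else 0
--     second = runs[1] if len(runs) > 1 else 0
--     return best, second
-- ===== Notes on version B (the rewrite author's own statement) =====
-- stated objective: alternative
-- what changed: Replaces the single interleaved pass with a three-branch best/second update by two phases: collect the flushed zero-run lengths into a list, then sort it descending and take the top two entries (defaulting to 0).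
import Mathlib
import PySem

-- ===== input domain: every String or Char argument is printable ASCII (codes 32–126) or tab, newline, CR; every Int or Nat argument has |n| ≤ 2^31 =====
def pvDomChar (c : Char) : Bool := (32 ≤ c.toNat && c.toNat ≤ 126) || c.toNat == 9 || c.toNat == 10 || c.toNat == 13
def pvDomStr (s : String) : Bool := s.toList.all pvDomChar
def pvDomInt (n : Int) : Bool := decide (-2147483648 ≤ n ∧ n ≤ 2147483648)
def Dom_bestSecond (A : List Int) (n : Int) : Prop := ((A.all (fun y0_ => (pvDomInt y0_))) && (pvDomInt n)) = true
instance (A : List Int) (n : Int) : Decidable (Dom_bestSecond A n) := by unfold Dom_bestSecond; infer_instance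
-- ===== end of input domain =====

-- B replaces A's single interleaved pass (three-branch best/second update) by two phases:
-- collect the flushed zero-run lengths, then sort descending and take the top two (objective: alternative).

-- ===== PORT A =====
-- A's loop body on the state (best, second, counter) and the element value A[i]
def stepA (st : Int × Int × Int) (x : Int) : Int × Int × Int :=
  if x = 0 then (st.1, st.2.1, st.2.2 + 1)
  else if st.2.2 > st.1 then (st.2.2, st.1, 0)
  else if st.2.2 = st.1 then (st.1, st.2.2, 0)
  else if st.2.2 > st.2.1 then (st.1, st.2.2, 0)
  else (st.1, st.2.1, 0)

-- literal port of A: fold over range(n), returning (best, second)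
def bestSecond (A : List Int) (n : Int) : Int × Int :=
  (((PySem.List.pyRange 0 n 1).foldl (fun st i => stepA st (PySem.List.pyGetD A i 0)) (0, 0, 0)).1,
   ((PySem.List.pyRange 0 n 1).foldl (fun st i => stepA st (PySem.List.pyGetD A i 0)) (0, 0, 0)).2.1)

-- ===== PORT B =====
-- B's first-pass loop body: collect flushed run lengths, state (runs, counter)
def stepB (p : List Int × Int) (x : Int) : List Int × Int :=
  if x = 0 then (p.1, p.2 + 1) else (p.1 ++ [p.2], 0)

-- B's second pass: top two entries of the descending-sorted run list, defaulting to 0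
def topTwo (runs : List Int) : Int × Int :=
  (if 0 < runs.length then runs.getD 0 0 else 0,
   if 1 < runs.length then runs.getD 1 0 else 0)

-- literal port of B: runs over A[:max(n,0)], sorted reverse=True, top two
def bestSecond_alt (A : List Int) (n : Int) : Int × Int :=
  topTwo (PySem.List.sorted
    ((PySem.List.slice A none (some (max n 0))).foldl stepB ([], 0)).1 (fun x => x) true)

-- ===== PRECONDITION & SPEC =====
-- Pre_ excludes exactly the inputs where A raises IndexError: n > len(A) (for n ≤ 0 A's loop is empty).
def Pre_bestSecond (A : List Int) (n : Int) : Prop := n ≤ (A.length : Int)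
instance (A : List Int) (n : Int) : Decidable (Pre_bestSecond A n) := by unfold Pre_bestSecond; infer_instance
def pvWitness_bestSecond : List Int × Int := ([1, 0, 0, 1, 0], 5)

def Spec_bestSecond (A : List Int) (n : Int) (out : Int × Int) : Prop := out = bestSecond_alt A n
instance (A : List Int) (n : Int) (out : Int × Int) : Decidable (Spec_bestSecond A n out) := by unfold Spec_bestSecond; infer_instance

-- ===== CLAIM (what is proved, stated in full; the proofs are below) =====
def Claim_equal_bestSecond : Prop := ∀ (A : List Int) (n : Int), Dom_bestSecond A n → Pre_bestSecond A n → Spec_bestSecond A n (bestSecond A n)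

-- ===== LEMMAS AND PROOFS =====

-- the flushed run lengths of a list, starting with open counter c
def runsFrom (L : List Int) (c : Int) : List Int × Int :=
  match L with
  | [] => ([], c)
  | x :: xs => if x = 0 then runsFrom xs (c + 1)
               else (c :: (runsFrom xs 0).1, (runsFrom xs 0).2)

-- symmetric top-two step
def g (p : Int × Int) (r : Int) : Int × Int := (max p.1 r, max p.2 (min p.1 r))

theorem g_rightComm (p : Int × Int) (a c : Int) : g (g p a) c = g (g p c) a := by
  simp only [g, Prod.mk.injEq]
  constructor <;> omega

theorem stepA_eq_g (b s c x : Int) (hsb : s ≤ b) :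
    stepA (b, s, c) x = if x = 0 then (b, s, c + 1) else ((g (b, s) c).1, (g (b, s) c).2, 0) := by
  simp only [stepA, g]
  split_ifs <;> simp_all <;> omega

theorem foldl_stepA_runs (L : List Int) : ∀ (b s c : Int), s ≤ b →
    L.foldl stepA (b, s, c) = (((runsFrom L c).1.foldl g (b, s)).1,
                               ((runsFrom L c).1.foldl g (b, s)).2, (runsFrom L c).2) := by
  induction L with
  | nil => intro b s c _; simp [runsFrom]
  | cons x xs ih =>
    intro b s c hsb
    simp only [List.foldl_cons, stepA_eq_g b s c x hsb, runsFrom]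
    by_cases hx : x = 0
    · simp only [if_pos hx, ih b s (c + 1) hsb]
    · have hsb' : max s (min b c) ≤ max b c := by omega
      simpa only [if_neg hx, g, List.foldl_cons] using ih (max b c) (max s (min b c)) 0 hsb'

theorem foldl_stepB_runs (L : List Int) : ∀ (acc : List Int) (c : Int),
    L.foldl stepB (acc, c) = (acc ++ (runsFrom L c).1, (runsFrom L c).2) := by
  induction L with
  | nil => intro acc c; simp [runsFrom]
  | cons x xs ih =>
    intro acc c
    by_cases hx : x = 0
    · simp [stepB, hx, runsFrom, ih]
    · simp [stepB, hx, runsFrom, ih]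

theorem runsFrom_nonneg (L : List Int) : ∀ (c : Int), 0 ≤ c →
    ∀ r ∈ (runsFrom L c).1, 0 ≤ r := by
  induction L with
  | nil => intro c _; simp [runsFrom]
  | cons x xs ih =>
    intro c hc r hr
    by_cases hx : x = 0
    · simp only [runsFrom, if_pos hx] at hr
      exact ih (c + 1) (by omega) r hr
    · simp only [runsFrom, if_neg hx] at hr
      rcases List.mem_cons.mp hr with h | h
      · omega
      · exact ih 0 le_rfl r h

-- fold of g over a list whose elements are all ≤ s (tail of a sorted run)
theorem foldl_g_small (t : List Int) : ∀ (b s : Int), s ≤ b → (∀ e ∈ t, e ≤ s) →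
    t.foldl g (b, s) = (b, s) := by
  induction t with
  | nil => intro b s _ _; rfl
  | cons e t ih =>
    intro b s hsb hsmall
    have he : e ≤ s := hsmall e (List.mem_cons_self ..)
    have h1 : g (b, s) e = (b, s) := by simp only [g, Prod.mk.injEq]; constructor <;> omega
    simp only [List.foldl_cons, h1]
    exact ih b s hsb (fun x hx => hsmall x (List.mem_cons_of_mem _ hx))

-- fold of g over a descending nonnegative list gives its top two entries
theorem foldl_g_sorted (L : List Int) (hnn : ∀ r ∈ L, 0 ≤ r)
    (hs : L.Pairwise (fun a b => b ≤ a)) :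
    L.foldl g (0, 0) = topTwo L := by
  match L with
  | [] => rfl
  | [r] =>
    have : (0 : Int) ≤ r := hnn r (by simp)
    simp [g, topTwo, List.foldl]; omega
  | r :: r2 :: t =>
    have hr : (0 : Int) ≤ r := hnn r (by simp)
    have hr2 : (0 : Int) ≤ r2 := hnn r2 (by simp)
    have h21 : r2 ≤ r := (List.pairwise_cons.mp hs).1 r2 (by simp)
    have ht : ∀ e ∈ t, e ≤ r2 :=
      (List.pairwise_cons.mp (List.pairwise_cons.mp hs).2).1
    have h1 : g (0, 0) r = (r, 0) := by simp only [g, Prod.mk.injEq]; constructor <;> omega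
    have h2 : g (r, 0) r2 = (r, r2) := by simp only [g, Prod.mk.injEq]; constructor <;> omega
    simp only [List.foldl_cons, h1, h2, foldl_g_small t r r2 h21 ht]
    simp [topTwo]

theorem fold_range_eq_fold_take (A : List Int) (n : Int) (hn : n ≤ (A.length : Int))
    {β : Type} (f : β → Int → β) (init : β) (d : Int) :
    (PySem.List.pyRange 0 n 1).foldl (fun acc i => f acc (PySem.List.pyGetD A i d)) init
      = (A.take n.toNat).foldl f init := by
  have hlen : ((A.take n.toNat).length : Int) = max n 0 := by
    simp [List.length_take]; omega
  have hr : PySem.List.pyRange 0 n 1 = PySem.List.pyRange 0 ((A.take n.toNat).length : Int) 1 := by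
    by_cases h : n ≤ 0
    · rw [PySem.List.pyRange_one_eq_nil h, PySem.List.pyRange_one_eq_nil (by omega)]
    · rw [hlen]; congr 1; omega
  have hcongr : (PySem.List.pyRange 0 ((A.take n.toNat).length : Int) 1).foldl
      (fun acc i => f acc (PySem.List.pyGetD A i d)) init
      = (PySem.List.pyRange 0 ((A.take n.toNat).length : Int) 1).foldl
      (fun acc i => f acc (PySem.List.pyGetD (A.take n.toNat) i d)) init := by
    apply PySem.List.foldl_congr_mem
    intro acc i hi
    have hmem := (PySem.List.mem_pyRange_one).mp hi
    congr 1
    rw [PySem.List.pyGetD_eq_getElem A d hmem.1 (by omega),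
        PySem.List.pyGetD_eq_getElem (A.take n.toNat) d hmem.1 (by omega)]
    exact (List.getElem_take).symm
  rw [hr, hcongr]
  exact PySem.List.foldl_pyRange_zero_pyGetD' (A.take n.toNat) d f init

-- ===== VERDICT (by name: the statement is the Claim_ definition above) =====
theorem bestSecond_spec : Claim_equal_bestSecond := by
  intro A n _ hpre
  unfold Spec_bestSecond bestSecond bestSecond_alt
  have hslice : PySem.List.slice A none (some (max n 0)) = A.take n.toNat := by
    rw [PySem.List.slice_to A (le_max_right n 0)]
    congr 1; omega
  rw [hslice, fold_range_eq_fold_take A n hpre stepA (0, 0, 0) 0]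
  set L := A.take n.toNat with hL
  rw [foldl_stepB_runs L [] 0, foldl_stepA_runs L 0 0 0 le_rfl]
  set rs := (runsFrom L 0).1 with hrs
  have hnn : ∀ r ∈ rs, 0 ≤ r := runsFrom_nonneg L 0 le_rfl
  set srt := PySem.List.sorted rs (fun x => x) true with hsrt
  have hperm : srt.Perm rs := PySem.List.sorted_perm ..
  have hfold : rs.foldl g (0, 0) = srt.foldl g (0, 0) :=
    (hperm.foldl_eq' (fun x _ y _ z => g_rightComm z x y) (0, 0)).symm
  have hpw : srt.Pairwise (fun a b => b ≤ a) := PySem.List.sorted_pairwise_rev ..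
  have hnn' : ∀ r ∈ srt, 0 ≤ r := fun r hr => hnn r (hperm.mem_iff.mp hr)
  rw [List.nil_append, hfold, foldl_g_sorted srt hnn' hpw]
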